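-- pv_equiv track=rewrite | github.com/sherbold/replication-kit-2020-smoke-testing | generated-tests/sklearn/test_SKLEARN_OPTICS.py | flip_same_clusters
-- ===== SOURCE A (Python) =====
-- def flip_same_clusters(morph_clusters, expected_clusters):
--     flipped_clusters = {}
--     for morph_cluster in morph_clusters:
--         flipped = False
--         for exp_cluster in expected_clusters:
--             if morph_clusters[morph_cluster] == expected_clusters[exp_cluster]:
--                 flipped_clusters[exp_cluster] = expected_clusters[exp_cluster]
--                 flipped = True
--                 break
--         if not flipped:
--             flipped_clusters[morph_cluster] = morph_clusters[morph_cluster]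
--     return flipped_clusters
-- ===== SOURCE B (Python) =====
-- def flip_same_clusters(morph_clusters, expected_clusters):
--     # Declarative two-stage pipeline, no explicit loops/branches/flags:
--     # last-write-wins over the REVERSED expected items makes the FIRST
--     # expected occurrence of each value win in the index.
--     index = {tuple(v): k for k, v in reversed(list(expected_clusters.items()))}
--     return {index.get(tuple(v), k): v for k, v in morph_clusters.items()}
-- ===== Notes on version B (the rewrite author's own statement) =====
-- stated objective: faster
-- what changed: B is a two-stage declarative pipeline: a dict comprehension over the REVERSED expected items builds a value->key index (last write wins, so the first expected occurrence wins) and a second comprehension renames every morph cluster with one hash lookup, eliminating A's nested scan, break/flag control flow and repeated dict lookups.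
import Mathlib
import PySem

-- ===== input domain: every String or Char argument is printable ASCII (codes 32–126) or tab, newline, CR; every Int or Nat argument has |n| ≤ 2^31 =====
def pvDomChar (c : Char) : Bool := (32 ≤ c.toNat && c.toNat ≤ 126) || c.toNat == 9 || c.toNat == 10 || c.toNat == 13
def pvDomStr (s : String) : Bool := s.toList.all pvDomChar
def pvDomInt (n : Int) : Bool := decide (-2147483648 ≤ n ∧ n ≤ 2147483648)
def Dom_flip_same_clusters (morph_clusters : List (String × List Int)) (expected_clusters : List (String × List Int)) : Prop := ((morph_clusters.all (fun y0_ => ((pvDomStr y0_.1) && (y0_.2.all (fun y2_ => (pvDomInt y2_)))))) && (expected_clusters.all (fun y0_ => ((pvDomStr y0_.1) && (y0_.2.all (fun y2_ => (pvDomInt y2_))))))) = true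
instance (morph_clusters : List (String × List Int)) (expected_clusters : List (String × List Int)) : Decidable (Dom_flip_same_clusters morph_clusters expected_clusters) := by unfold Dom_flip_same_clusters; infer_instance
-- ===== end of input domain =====

-- B replaces A's nested scan with flag/break by a declarative two-stage pipeline (reversed-items
-- index comprehension, then a renaming comprehension); a timing run measures the speed claim.

-- ===== PORT A =====
-- A iterates the keys of morph_clusters; for each, it scans expected_clusters for a key with
-- an equal value (first match, `break`), re-reading both values through dict lookups.
def flip_same_clusters (morph_clusters : List (String × List Int)) (expected_clusters : List (String × List Int)) : List (String × List Int) :=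
  (morph_clusters.foldl
    (fun (flipped : PySem.Dict String (List Int)) p =>
      match expected_clusters.find?
          (fun q => (PySem.Dict.mk morph_clusters).get? p.1 == (PySem.Dict.mk expected_clusters).get? q.1) with
      | some q => flipped.insert q.1 (((PySem.Dict.mk expected_clusters).get? q.1).getD [])
      | none   => flipped.insert p.1 (((PySem.Dict.mk morph_clusters).get? p.1).getD []))
    PySem.Dict.empty).items

-- ===== PORT B =====
-- B: dict comprehension over the REVERSED expected items (last write wins = first occurrence
-- wins) builds the value→key index; a second comprehension renames every morph pair.
def flip_same_clusters_alt (morph_clusters : List (String × List Int)) (expected_clusters : List (String × List Int)) : List (String × List Int) :=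
  let index : PySem.Dict (List Int) String :=
    (expected_clusters.reverse).foldl (fun d q => d.insert q.2 q.1) PySem.Dict.empty
  (PySem.Dict.ofList (morph_clusters.map (fun p => (index.getD p.2 p.1, p.2)))).items

-- ===== PRECONDITION & SPEC =====
-- Pre_ requires both association lists to have pairwise-distinct keys: a Python dict cannot
-- hold duplicate keys, so assoc lists with duplicates represent no input A is ever called on.
def Pre_flip_same_clusters (morph_clusters : List (String × List Int)) (expected_clusters : List (String × List Int)) : Prop :=
  (morph_clusters.map Prod.fst).Nodup ∧ (expected_clusters.map Prod.fst).Nodup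
instance (morph_clusters : List (String × List Int)) (expected_clusters : List (String × List Int)) : Decidable (Pre_flip_same_clusters morph_clusters expected_clusters) := by unfold Pre_flip_same_clusters; infer_instance

def pvWitness_flip_same_clusters : (List (String × List Int)) × (List (String × List Int)) :=
  ([("a", [1, 2]), ("b", [3])], [("x", [3]), ("y", [1, 2])])

def Spec_flip_same_clusters (morph_clusters : List (String × List Int)) (expected_clusters : List (String × List Int)) (out : List (String × List Int)) : Prop := out = flip_same_clusters_alt morph_clusters expected_clusters
instance (morph_clusters : List (String × List Int)) (expected_clusters : List (String × List Int)) (out : List (String × List Int)) : Decidable (Spec_flip_same_clusters morph_clusters expected_clusters out) := by unfold Spec_flip_same_clusters; infer_instance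

-- ===== CLAIM (what is proved, stated in full; the proofs are below) =====
def Claim_equal_flip_same_clusters : Prop := ∀ (morph_clusters : List (String × List Int)) (expected_clusters : List (String × List Int)), Dom_flip_same_clusters morph_clusters expected_clusters → Pre_flip_same_clusters morph_clusters expected_clusters → Spec_flip_same_clusters morph_clusters expected_clusters (flip_same_clusters morph_clusters expected_clusters)

-- ===== LEMMAS AND PROOFS =====

-- With distinct keys, looking the key of a member pair up in the whole list yields its value.
lemma get?_mk_of_mem {l : List (String × List Int)} {p : String × List Int}
    (hnd : (l.map Prod.fst).Nodup) (hp : p ∈ l) :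
    (PySem.Dict.mk l).get? p.1 = some p.2 := by
  apply PySem.Dict.get?_of_mem_items
  · show (p.1, p.2) ∈ l
    simpa using hp
  · show (l.map Prod.fst).Nodup
    exact hnd

-- find? only depends on the predicate's values on members.
lemma find?_congr_mem {α : Type} {l : List α} {p q : α → Bool}
    (h : ∀ x ∈ l, p x = q x) : l.find? p = l.find? q := by
  induction l with
  | nil => rfl
  | cons a t ih =>
    have ha := h a (by simp)
    simp only [List.find?]
    rw [ha, ih (fun x hx => h x (by simp [hx]))]

-- The reversed-items index: looking a value up yields the FIRST expected key with that value
-- (the last write over the reversed list is the earliest occurrence).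
lemma index_get? (e : List (String × List Int)) (v : List Int) :
    ((e.reverse).foldl (fun d q => d.insert q.2 q.1) (PySem.Dict.empty : PySem.Dict (List Int) String)).get? v
      = (e.find? (fun q => v == q.2)).map Prod.fst := by
  rw [List.foldl_reverse]
  induction e with
  | nil => simp
  | cons q t ih =>
    simp only [List.foldr_cons, List.find?]
    by_cases hv : v = q.2
    · rw [PySem.Dict.get?_insert]
      simp [hv]
    · rw [PySem.Dict.get?_insert, if_neg hv, ih]
      have : (v == q.2) = false := by simpa using hv
      simp [this]

-- ===== VERDICT (by name: the statement is the Claim_ definition above) =====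

theorem flip_same_clusters_spec : Claim_equal_flip_same_clusters := by
  intro m e _ hpre
  obtain ⟨hm, he⟩ := hpre
  unfold Spec_flip_same_clusters flip_same_clusters flip_same_clusters_alt
  show _ = (PySem.Dict.ofList (m.map _)).items
  have hof : ∀ (l : List (String × List Int)),
      PySem.Dict.ofList l = l.foldl (fun d p => d.insert p.1 p.2) PySem.Dict.empty :=
    fun l => rfl
  rw [hof, List.foldl_map]
  congr 1
  apply PySem.List.foldl_congr_mem
  intro acc p hp
  have hpm : (PySem.Dict.mk m).get? p.1 = some p.2 := get?_mk_of_mem hm hp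
  rw [hpm]
  have hfind : e.find? (fun q => (some p.2 : Option (List Int)) == (PySem.Dict.mk e).get? q.1)
      = e.find? (fun q => p.2 == q.2) := by
    apply find?_congr_mem
    intro q hq
    rw [get?_mk_of_mem he hq]
    simp
  rw [hfind]
  rw [PySem.Dict.getD_eq_get?_getD, index_get?]
  rcases hfq : e.find? (fun q => p.2 == q.2) with _ | q
  · rw [hfq]; simp
  · have hqmem : q ∈ e := List.mem_of_find?_eq_some hfq
    have hqval : p.2 = q.2 := by
      have := List.find?_some hfq; simpa using this
    rw [hfq]
    simp [get?_mk_of_mem he hqmem, ← hqval]
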